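-- pv_equiv track=rewrite | github.com/oculi-s/Programmers | PRG_L3_PY/징검다리 건너기.py | solution
-- ===== SOURCE A (Python) =====
-- def solution(stones, k):
--     l, r = min(stones), max(stones)
--     stones = [max(stones)] + stones + [max(stones)]
--     while l <= r:
--         m = (l + r)//2
--         v = 0
--         h = 0
--         for i,x in enumerate(stones):
--             if x >= m:
--                 if i - h > v:
--                     v = i - h
--                     if v > k:
--                         r = m - 1
--                         break
--                 h = i
--         if v <= k:
--             l = m + 1
--     return l - 1
-- ===== SOURCE B (Python) =====
-- def solution(stones, k):
--     # direct formulation: answer = min over all k-windows of the window maximum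
--     n = len(stones)
--     if k > n:
--         return max(stones)
--     return min(max(stones[i:i+k]) for i in range(n - k + 1))
-- ===== Notes on version B (the rewrite author's own statement) =====
-- stated objective: simpler
-- what changed: A binary-searches the answer over the stone values, re-scanning the padded list for the largest gap at each probe; B computes the answer directly as the minimum over all k-windows of the window maximum, with no search and no sentinel padding.
-- outside the precondition, e.g. on solution([], 3): A raises ValueError, B raises ValueError; on solution([3, 1, 2], 0): A returns 0, B raises ValueError
import Mathlib
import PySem

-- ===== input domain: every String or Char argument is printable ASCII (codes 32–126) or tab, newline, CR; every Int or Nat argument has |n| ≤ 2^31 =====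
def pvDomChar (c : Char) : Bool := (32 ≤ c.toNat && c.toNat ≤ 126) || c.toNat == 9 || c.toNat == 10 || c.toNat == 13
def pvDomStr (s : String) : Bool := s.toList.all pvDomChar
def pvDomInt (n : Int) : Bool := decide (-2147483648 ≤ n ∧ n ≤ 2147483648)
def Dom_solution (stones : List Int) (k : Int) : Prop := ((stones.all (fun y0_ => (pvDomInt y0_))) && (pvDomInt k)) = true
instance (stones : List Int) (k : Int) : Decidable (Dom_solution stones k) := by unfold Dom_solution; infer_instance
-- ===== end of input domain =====

-- B replaces A's binary search over the answer value by the direct formulation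
-- "minimum over all k-windows of the window maximum" (objective: simpler; not claimed faster).

-- ===== PORT A =====
-- the inner 'for i,x in enumerate(stones)' loop of A: state (i, h, v); returns (v, r)
-- where r is m-1 if the loop broke and the passed-in r otherwise
def forA (m k r : Int) : List Int → Int → Int → Int → Int × Int
  | [], _, _, v => (v, r)
  | x :: xs, i, h, v =>
    if m ≤ x then
      if i - h > v then
        if i - h > k then (i - h, m - 1)
        else forA m k r xs (i + 1) i (i - h)
      else forA m k r xs (i + 1) i v
    else forA m k r xs (i + 1) h v

-- the 'while l <= r' binary search; fuel only makes the recursion structural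
-- (inside Pre_ the interval shrinks every iteration, so the fuel passed by
-- `solution` is never exhausted there)
def bsA (P : List Int) (k : Int) : Nat → Int → Int → Int
  | 0, l, _ => l - 1
  | fuel + 1, l, r =>
    if l ≤ r then
      let m := PySem.Int.floordiv (l + r) 2
      let res := forA m k r P 0 0 0
      if res.1 ≤ k then bsA P k fuel (m + 1) res.2 else bsA P k fuel l res.2
    else l - 1

def solution (stones : List Int) (k : Int) : Int :=
  let mn := (PySem.List.min? stones (fun x => x)).getD 0
  let mx := (PySem.List.max? stones (fun x => x)).getD 0
  bsA ([mx] ++ stones ++ [mx]) k (mx - mn + 2).toNat mn mx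

-- ===== PORT B =====
def solution_alt (stones : List Int) (k : Int) : Int :=
  let n : Int := PySem.List.len stones
  if k > n then (PySem.List.max? stones (fun x => x)).getD 0
  else
    (PySem.List.min?
      ((PySem.List.pyRange 0 (n - k + 1) 1).map (fun i =>
        (PySem.List.max? (PySem.List.slice stones (some i) (some (i + k))) (fun x => x)).getD 0))
      (fun x => x)).getD 0

-- ===== PRECONDITION & SPEC =====
-- Pre_ excludes the empty list (A raises ValueError in min) and k ≤ 0, which is outside
-- the problem's natural domain (no jump possible): B naturally raises ValueError there
-- (max of an empty window), while A's value min(stones)-1 is an artefact of its search.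
def Pre_solution (stones : List Int) (k : Int) : Prop := stones ≠ [] ∧ 1 ≤ k
instance (stones : List Int) (k : Int) : Decidable (Pre_solution stones k) := by unfold Pre_solution; infer_instance

def pvWitness_solution : List Int × Int := ([2, 4, 5, 3, 2, 1, 4, 2, 5, 1], 3)

def Spec_solution (stones : List Int) (k : Int) (out : Int) : Prop := out = solution_alt stones k
instance (stones : List Int) (k : Int) (out : Int) : Decidable (Spec_solution stones k out) := by unfold Spec_solution; infer_instance

-- ===== CLAIM (what is proved, stated in full; the proofs are below) =====
def Claim_equal_solution : Prop := ∀ (stones : List Int) (k : Int), Dom_solution stones k → Pre_solution stones k → Spec_solution stones k (solution stones k)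

-- ===== LEMMAS AND PROOFS =====

-- length of the prefix of xs holding only elements < m
def pref (m : Int) : List Int → Int
  | [] => 0
  | x :: xs => if m ≤ x then 0 else 1 + pref m xs

-- every suffix of xs starts with fewer than k consecutive elements < m
def NoRun (m k : Int) : List Int → Prop
  | [] => True
  | x :: xs => 1 + pref m (x :: xs) ≤ k ∧ NoRun m k xs

-- the break behaviour of A's inner loop, as a recursion on the remaining list and
-- the current gap g = i - h
def NoBad (m k : Int) : List Int → Int → Prop
  | [], _ => True
  | x :: xs, g => if m ≤ x then g ≤ k ∧ NoBad m k xs 1 else NoBad m k xs (g + 1)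

-- NoBad with a trailing qualifying sentinel
def NB (m k : Int) : List Int → Int → Prop
  | [], g => g ≤ k
  | x :: xs, g => if m ≤ x then g ≤ k ∧ NB m k xs 1 else NB m k xs (g + 1)

theorem pref_nonneg (m : Int) (xs : List Int) : 0 ≤ pref m xs := by
  induction xs with
  | nil => simp [pref]
  | cons x xs ih => simp only [pref]; split <;> omega

theorem pref_le_length (m : Int) (xs : List Int) : pref m xs ≤ xs.length := by
  induction xs with
  | nil => simp [pref]
  | cons x xs ih => simp only [pref, List.length_cons]; split <;> push_cast <;> omega

theorem exists_take_iff (m : Int) (c : Nat) (zs : List Int) (hc : (c : Int) ≤ zs.length) :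
    (∃ y ∈ zs.take c, m ≤ y) ↔ pref m zs < c := by
  induction zs generalizing c with
  | nil =>
    simp only [List.length_nil] at hc
    have : c = 0 := by omega
    subst this
    simp [pref]
  | cons x t ih =>
    cases c with
    | zero =>
      have := pref_nonneg m (x :: t)
      simp only [List.take_zero]
      constructor
      · rintro ⟨y, hy, -⟩; simp at hy
      · intro hlt; omega
    | succ c =>
      simp only [List.take_succ_cons, pref]
      by_cases hx : m ≤ x
      · simp only [if_pos hx]
        constructor
        · intro _; push_cast; omega
        · intro _; exact ⟨x, by simp, hx⟩
      · simp only [if_neg hx]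
        have hc' : (c : Int) ≤ t.length := by
          simp only [List.length_cons] at hc; push_cast at hc ⊢; omega
        have := ih c hc'
        have hp := pref_nonneg m t
        constructor
        · rintro ⟨y, hy, hmy⟩
          rcases List.mem_cons.mp hy with rfl | hy'
          · exact absurd hmy hx
          · have := this.mp ⟨y, hy', hmy⟩; push_cast; omega
        · intro hlt
          have : pref m t < (c : Int) := by push_cast at hlt; omega
          obtain ⟨y, hy, hmy⟩ := (ih c hc').mpr this
          exact ⟨y, List.mem_cons_of_mem _ hy, hmy⟩

theorem NoRun_iff_drop (m k : Int) (xs : List Int) :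
    NoRun m k xs ↔ ∀ i : Nat, i < xs.length → 1 + pref m (xs.drop i) ≤ k := by
  induction xs with
  | nil => simp [NoRun]
  | cons x t ih =>
    constructor
    · rintro ⟨h1, h2⟩ i hi
      cases i with
      | zero => simpa using h1
      | succ j =>
        have := (ih.mp h2) j (by simpa using Nat.lt_of_succ_lt_succ hi)
        simpa using this
    · intro H
      refine ⟨by simpa using H 0 (by simp), ih.mpr ?_⟩
      intro j hj
      have := H (j + 1) (by simpa using Nat.succ_lt_succ hj)
      simpa using this

theorem NoRun_head_pref (m k : Int) (xs : List Int) (h : NoRun m k xs) (hk : 1 ≤ k) :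
    1 + pref m xs ≤ k := by
  cases xs with
  | nil => simp [pref]; omega
  | cons x xs => exact h.1

theorem forA_char (m k r : Int) (xs : List Int) (i h v : Int) (hv : v ≤ k) :
    ((forA m k r xs i h v).2 = r ∧ (forA m k r xs i h v).1 ≤ k) ∨
    ((forA m k r xs i h v).2 = m - 1 ∧ k < (forA m k r xs i h v).1) := by
  induction xs generalizing i h v with
  | nil => exact Or.inl ⟨rfl, hv⟩
  | cons x t ih =>
    simp only [forA]
    split_ifs with h1 h2 h3
    · exact Or.inr ⟨rfl, h3⟩
    · exact ih (i + 1) i (i - h) (by omega)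
    · exact ih (i + 1) i v hv
    · exact ih (i + 1) h v hv

theorem forA_le_iff (m k r : Int) (xs : List Int) (i h v : Int)
    (hv0 : 0 ≤ v) (hvk : v ≤ k) (hhi : h ≤ i) :
    ((forA m k r xs i h v).1 ≤ k ↔ NoBad m k xs (i - h)) := by
  induction xs generalizing i h v with
  | nil => simp only [forA, NoBad]; constructor <;> intro <;> trivial
  | cons x t ih =>
    simp only [forA, NoBad]
    split_ifs with h1 h2 h3
    · constructor
      · intro hle; exact absurd hle (by omega)
      · rintro ⟨hgk, -⟩; omega
    · have heq2 := ih (i + 1) i (i - h) (by omega) (by omega) (by omega)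
      have heq : i + 1 - i = (1 : Int) := by ring
      rw [heq] at heq2
      rw [heq2]
      constructor
      · intro hnb; exact ⟨by omega, hnb⟩
      · rintro ⟨-, hnb⟩; exact hnb
    · have heq2 := ih (i + 1) i v hv0 hvk (by omega)
      have heq : i + 1 - i = (1 : Int) := by ring
      rw [heq] at heq2
      rw [heq2]
      constructor
      · intro hnb; exact ⟨by omega, hnb⟩
      · rintro ⟨-, hnb⟩; exact hnb
    · have heq2 := ih (i + 1) h v hv0 hvk (by omega)
      have heq : i + 1 - h = (i - h) + 1 := by ring
      rw [heq] at heq2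
      exact heq2

theorem NoBad_append_singleton (m k t : Int) (ht : m ≤ t) (xs : List Int) (g : Int) :
    NoBad m k (xs ++ [t]) g ↔ NB m k xs g := by
  induction xs generalizing g with
  | nil =>
    simp only [List.nil_append, NoBad, NB, if_pos ht]
    constructor
    · rintro ⟨hg, -⟩; exact hg
    · intro hg; exact ⟨hg, trivial⟩
  | cons x t ih =>
    simp only [List.cons_append, NoBad, NB]
    split_ifs with hx
    · exact and_congr_right fun _ => ih 1
    · exact ih (g + 1)

theorem NB_iff (m k : Int) (xs : List Int) (g : Int) (hg : 1 ≤ g) :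
    NB m k xs g ↔ (g + pref m xs ≤ k ∧ NoRun m k xs) := by
  induction xs generalizing g with
  | nil =>
    simp only [NB, pref, NoRun]
    constructor
    · intro hgk; exact ⟨by omega, trivial⟩
    · rintro ⟨hgk, -⟩; omega
  | cons x t ih =>
    by_cases hx : m ≤ x
    · simp only [NB, pref, NoRun, if_pos hx]
      have h1 := ih 1 (by omega)
      have hp := pref_nonneg m t
      constructor
      · rintro ⟨hgk, hnb⟩
        obtain ⟨hpt, hnr⟩ := h1.mp hnb
        exact ⟨by omega, by omega, hnr⟩
      · rintro ⟨hgk, h1k, hnr⟩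
        exact ⟨by omega, h1.mpr ⟨NoRun_head_pref m k t hnr (by omega), hnr⟩⟩
    · simp only [NB, pref, NoRun, if_neg hx]
      have h1 := ih (g + 1) (by omega)
      have hp := pref_nonneg m t
      rw [h1]
      constructor
      · rintro ⟨hgk, hnr⟩
        exact ⟨by omega, by omega, hnr⟩
      · rintro ⟨hgk, -, hnr⟩
        exact ⟨by omega, hnr⟩

theorem max_getD_iff (m : Int) (ys : List Int) (hne : ys ≠ []) :
    (m ≤ (PySem.List.max? ys (fun x => x)).getD 0 ↔ ∃ y ∈ ys, m ≤ y) := by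
  cases hm : PySem.List.max? ys (fun x => x) with
  | none => exact absurd ((PySem.List.max?_eq_none_iff _ _).mp hm) hne
  | some t =>
    simp only [Option.getD_some]
    constructor
    · intro hmt; exact ⟨t, PySem.List.max?_mem hm, hmt⟩
    · rintro ⟨y, hy, hmy⟩
      exact le_trans hmy (PySem.List.max?_isMax hm y hy)

theorem min_getD_iff (m : Int) (ws : List Int) (hne : ws ≠ []) :
    (m ≤ (PySem.List.min? ws (fun x => x)).getD 0 ↔ ∀ w ∈ ws, m ≤ w) := by
  cases hm : PySem.List.min? ws (fun x => x) with
  | none => exact absurd ((PySem.List.min?_eq_none_iff _ _).mp hm) hne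
  | some t =>
    simp only [Option.getD_some]
    constructor
    · intro hmt w hw; exact le_trans hmt (PySem.List.min?_isMin hm w hw)
    · intro H; exact H t (PySem.List.min?_mem hm)

-- the feasibility test of A's probe m agrees with "m ≤ answer of B"
theorem window_len (stones : List Int) (k i : Int) (hk : 1 ≤ k) (hi : 0 ≤ i)
    (hin : i < (stones.length : Int) - k + 1) :
    (PySem.List.slice stones (some i) (some (i + k))).length = k.toNat ∧
    PySem.List.slice stones (some i) (some (i + k)) = List.take k.toNat (List.drop i.toNat stones) := by
  have h1 := PySem.List.slice_toNat stones hi (by omega : (0:Int) ≤ i + k)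
  have h2 : (i + k).toNat - i.toNat = k.toNat := by omega
  rw [h2] at h1
  refine ⟨?_, h1⟩
  rw [h1, List.length_take, List.length_drop]
  omega

theorem drop_iff_alt (stones : List Int) (k m : Int) (hne : stones ≠ []) (hk : 1 ≤ k)
    (hmmx : m ≤ (PySem.List.max? stones (fun x => x)).getD 0) :
    ((∀ i : Nat, i < stones.length → 1 + pref m (stones.drop i) ≤ k) ↔ m ≤ solution_alt stones k) := by
  have hn1 : stones.length ≠ 0 := fun h0 => hne (List.eq_nil_of_length_eq_zero h0)
  unfold solution_alt
  simp only [PySem.List.len_eq]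
  by_cases hkn : k > (stones.length : Int)
  · simp only [if_pos hkn]
    constructor
    · intro _; exact hmmx
    · intro _ i hi
      have h1 := pref_le_length m (stones.drop i)
      rw [List.length_drop] at h1
      omega
  · simp only [if_neg hkn]
    have hrange : (0:Int) < (stones.length : Int) - k + 1 := by omega
    have hwsne :
        ((PySem.List.pyRange 0 ((stones.length : Int) - k + 1) 1).map (fun i =>
          (PySem.List.max? (PySem.List.slice stones (some i) (some (i + k))) (fun x => x)).getD 0)) ≠ [] := by
      rw [PySem.List.pyRange_one_cons hrange]
      simp
    rw [min_getD_iff m _ hwsne]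
    constructor
    · intro H w hw
      obtain ⟨i, hi, rfl⟩ := List.mem_map.mp hw
      obtain ⟨hi0, hilt⟩ := PySem.List.mem_pyRange_one.mp hi
      obtain ⟨hlen, hslice⟩ := window_len stones k i hk hi0 hilt
      have hsne : PySem.List.slice stones (some i) (some (i + k)) ≠ [] := by
        intro hnil; rw [hnil] at hlen; simp at hlen; omega
      rw [max_getD_iff m _ hsne, hslice,
        exists_take_iff m k.toNat (stones.drop i.toNat) (by rw [List.length_drop]; omega)]
      have := H i.toNat (by omega)
      omega
    · intro H i hi
      by_cases hcase : (i : Int) < (stones.length : Int) - k + 1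
      · have hiR : (i : Int) ∈ PySem.List.pyRange 0 ((stones.length : Int) - k + 1) 1 :=
          PySem.List.mem_pyRange_one.mpr ⟨by omega, hcase⟩
        have hw := H _ (List.mem_map_of_mem hiR)
        obtain ⟨hlen, hslice⟩ := window_len stones k (i : Int) hk (by omega) hcase
        have hsne : PySem.List.slice stones (some (i:Int)) (some ((i:Int) + k)) ≠ [] := by
          intro hnil; rw [hnil] at hlen; simp at hlen; omega
        rw [max_getD_iff m _ hsne, hslice,
          exists_take_iff m k.toNat (stones.drop (i:Int).toNat) (by rw [List.length_drop]; omega)] at hw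
        have hit : ((i:Int)).toNat = i := by omega
        rw [hit] at hw
        omega
      · have h1 := pref_le_length m (stones.drop i)
        rw [List.length_drop] at h1
        omega

theorem feas_iff_alt (stones : List Int) (k m r : Int) (hne : stones ≠ []) (hk : 1 ≤ k)
    (hmmx : m ≤ (PySem.List.max? stones (fun x => x)).getD 0) :
    ((forA m k r ([(PySem.List.max? stones (fun x => x)).getD 0] ++ stones ++
        [(PySem.List.max? stones (fun x => x)).getD 0]) 0 0 0).1 ≤ k ↔
      m ≤ solution_alt stones k) := by
  rw [forA_le_iff m k r _ 0 0 0 (le_refl 0) (by omega) (le_refl 0)]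
  simp only [List.cons_append, List.nil_append, sub_zero]
  rw [show NoBad m k ((PySem.List.max? stones (fun x => x)).getD 0 ::
        (stones ++ [(PySem.List.max? stones (fun x => x)).getD 0])) 0 ↔
      (0 ≤ k ∧ NoBad m k (stones ++ [(PySem.List.max? stones (fun x => x)).getD 0]) 1) from by
    simp [NoBad, hmmx]]
  rw [NoBad_append_singleton m k _ hmmx stones 1]
  rw [NB_iff m k stones 1 (le_refl 1)]
  constructor
  · rintro ⟨-, -, hnr⟩
    exact (drop_iff_alt stones k m hne hk hmmx).mp ((NoRun_iff_drop m k stones).mp hnr)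
  · intro hma
    have hnr := (NoRun_iff_drop m k stones).mpr ((drop_iff_alt stones k m hne hk hmmx).mpr hma)
    have hhd := NoRun_head_pref m k stones hnr hk
    exact ⟨by omega, by omega, hnr⟩

theorem alt_bounds (stones : List Int) (k : Int) (hne : stones ≠ []) (hk : 1 ≤ k) :
    (PySem.List.min? stones (fun x => x)).getD 0 ≤ solution_alt stones k ∧
      solution_alt stones k ≤ (PySem.List.max? stones (fun x => x)).getD 0 := by
  have hn1 : stones.length ≠ 0 := fun h0 => hne (List.eq_nil_of_length_eq_zero h0)
  cases hmin : PySem.List.min? stones (fun x => x) with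
  | none => exact absurd ((PySem.List.min?_eq_none_iff _ _).mp hmin) hne
  | some mn =>
  cases hmax : PySem.List.max? stones (fun x => x) with
  | none => exact absurd ((PySem.List.max?_eq_none_iff _ _).mp hmax) hne
  | some mx =>
  have hmnle : ∀ y ∈ stones, mn ≤ y := PySem.List.min?_isMin hmin
  have hmxge : ∀ y ∈ stones, y ≤ mx := PySem.List.max?_isMax hmax
  have hmnmx : mn ≤ mx := hmnle mx (PySem.List.max?_mem hmax)
  simp only [Option.getD_some]
  unfold solution_alt
  simp only [PySem.List.len_eq, hmax, Option.getD_some]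
  by_cases hkn : k > (stones.length : Int)
  · simp only [if_pos hkn]
    exact ⟨hmnmx, le_refl mx⟩
  · simp only [if_neg hkn]
    have hrange : (0:Int) < (stones.length : Int) - k + 1 := by omega
    have hwsne :
        ((PySem.List.pyRange 0 ((stones.length : Int) - k + 1) 1).map (fun i =>
          (PySem.List.max? (PySem.List.slice stones (some i) (some (i + k))) (fun x => x)).getD 0)) ≠ [] := by
      rw [PySem.List.pyRange_one_cons hrange]
      simp
    constructor
    · rw [min_getD_iff mn _ hwsne]
      intro w hw
      obtain ⟨i, hi, rfl⟩ := List.mem_map.mp hw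
      obtain ⟨hi0, hilt⟩ := PySem.List.mem_pyRange_one.mp hi
      obtain ⟨hlen, hslice⟩ := window_len stones k i hk hi0 hilt
      have hsne : PySem.List.slice stones (some i) (some (i + k)) ≠ [] := by
        intro hnil; rw [hnil] at hlen; simp at hlen; omega
      rw [max_getD_iff mn _ hsne]
      obtain ⟨y, hy⟩ := List.exists_mem_of_ne_nil _ hsne
      exact ⟨y, hy, hmnle y (PySem.List.mem_of_mem_slice stones _ _ hy)⟩
    · cases hminw : PySem.List.min? ((PySem.List.pyRange 0 ((stones.length : Int) - k + 1) 1).map (fun i =>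
          (PySem.List.max? (PySem.List.slice stones (some i) (some (i + k))) (fun x => x)).getD 0)) (fun x => x) with
      | none => exact absurd ((PySem.List.min?_eq_none_iff _ _).mp hminw) hwsne
      | some w0 =>
        simp only [Option.getD_some]
        have hw0 := PySem.List.min?_mem hminw
        obtain ⟨i, hi, hfi⟩ := List.mem_map.mp hw0
        obtain ⟨hi0, hilt⟩ := PySem.List.mem_pyRange_one.mp hi
        obtain ⟨hlen, hslice⟩ := window_len stones k i hk hi0 hilt
        have hsne : PySem.List.slice stones (some i) (some (i + k)) ≠ [] := by
          intro hnil; rw [hnil] at hlen; simp at hlen; omega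
        cases hmaxw : PySem.List.max? (PySem.List.slice stones (some i) (some (i + k))) (fun x => x) with
        | none => exact absurd ((PySem.List.max?_eq_none_iff _ _).mp hmaxw) hsne
        | some t =>
          rw [hmaxw] at hfi
          simp only [Option.getD_some] at hfi
          rw [← hfi]
          exact hmxge t (PySem.List.mem_of_mem_slice stones _ _ (PySem.List.max?_mem hmaxw))

theorem bs_eq (P : List Int) (k T mx : Int) (hk : 1 ≤ k)
    (Hfeas : ∀ (m r' : Int), m ≤ mx → ((forA m k r' P 0 0 0).1 ≤ k ↔ m ≤ T)) :
    ∀ (fuel : Nat) (l r : Int), (r + 1 - l).toNat < fuel → l ≤ T + 1 → T ≤ r → r ≤ mx →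
      bsA P k fuel l r = T := by
  intro fuel
  induction fuel with
  | zero => intro l r hf _ _ _; exact absurd hf (Nat.not_lt_zero _)
  | succ fuel ih =>
    intro l r hf hl hTr hrmx
    by_cases hlr : l ≤ r
    · simp only [bsA, if_pos hlr]
      obtain ⟨hml, hmr⟩ := PySem.Int.floordiv_two_mid_bounds hlr
      have hchar := forA_char (PySem.Int.floordiv (l + r) 2) k r P 0 0 0 (by omega)
      by_cases hres : (forA (PySem.Int.floordiv (l + r) 2) k r P 0 0 0).1 ≤ k
      · simp only [if_pos hres]
        have h2 : (forA (PySem.Int.floordiv (l + r) 2) k r P 0 0 0).2 = r := by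
          rcases hchar with ⟨h2, -⟩ | ⟨-, hgt⟩
          · exact h2
          · omega
        rw [h2]
        have hmT := (Hfeas (PySem.Int.floordiv (l + r) 2) r (by omega)).mp hres
        exact ih (PySem.Int.floordiv (l + r) 2 + 1) r (by omega) (by omega) hTr hrmx
      · simp only [if_neg hres]
        have h2 : (forA (PySem.Int.floordiv (l + r) 2) k r P 0 0 0).2 =
            PySem.Int.floordiv (l + r) 2 - 1 := by
          rcases hchar with ⟨-, hle⟩ | ⟨h2, -⟩
          · exact absurd hle hres
          · exact h2
        rw [h2]
        have hmT : ¬ PySem.Int.floordiv (l + r) 2 ≤ T := fun hmT =>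
          hres ((Hfeas (PySem.Int.floordiv (l + r) 2) r (by omega)).mpr hmT)
        exact ih l (PySem.Int.floordiv (l + r) 2 - 1) (by omega) hl (by omega) (by omega)
    · simp only [bsA, if_neg hlr]
      omega

-- ===== VERDICT (by name: the statement is the Claim_ definition above) =====
theorem solution_spec : Claim_equal_solution := by
  intro stones k _ hpre
  obtain ⟨hne, hk⟩ := hpre
  unfold Spec_solution solution
  obtain ⟨hb1, hb2⟩ := alt_bounds stones k hne hk
  exact bs_eq _ k _ ((PySem.List.max? stones (fun x => x)).getD 0) hk
    (fun m r' hm => feas_iff_alt stones k m r' hne hk hm)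
    _ _ _ (by omega) (by omega) hb2 (le_refl _)
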